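-- pv_equiv track=rewrite | github.com/amcumber/advent-of-code-2023 | aoc_2023/day04/part2/solution.py | count_cards
-- ===== SOURCE A (Python) =====
-- def count_cards(scores: list[int]):
--     counts = [1] * len(scores)
--     for card_id, score in enumerate(scores):
--         n_cards = counts[card_id]
--         for idx in range(1, score + 1):
--             if (count_id := card_id + idx) < len(counts):
--                 counts[count_id] += n_cards
--             else:
--                 counts.append(n_cards)
--     return counts
-- ===== SOURCE B (Python) =====
-- def count_cards(scores: list[int]):
--     # Position-major single pass: compute the final length first, then each
--     # position's count directly from the closed formula
--     #   count[j] = (1 if j < n else 0) + sum of count[i] over cards i < min(j, n)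
--     #                                    whose score reaches position j.
--     n = len(scores)
--     total = n
--     for i, s in enumerate(scores):
--         if i + s + 1 > total:
--             total = i + s + 1
--     counts = []
--     for j in range(total):
--         c = 1 if j < n else 0
--         for i in range(min(j, n)):
--             if j - i <= scores[i]:
--                 c += counts[i]
--         counts.append(c)
--     return counts
-- ===== Notes on version B (the rewrite author's own statement) =====
-- stated objective: alternative
-- what changed: A propagates each card's count forward card-by-card, mutating/appending into a shared counts list; B first computes the final output length, then builds the result position-by-position, computing each position's count directly from the closed formula (sum over the earlier cards whose score reaches it) with no mutation or append bookkeeping.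
import Mathlib
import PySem

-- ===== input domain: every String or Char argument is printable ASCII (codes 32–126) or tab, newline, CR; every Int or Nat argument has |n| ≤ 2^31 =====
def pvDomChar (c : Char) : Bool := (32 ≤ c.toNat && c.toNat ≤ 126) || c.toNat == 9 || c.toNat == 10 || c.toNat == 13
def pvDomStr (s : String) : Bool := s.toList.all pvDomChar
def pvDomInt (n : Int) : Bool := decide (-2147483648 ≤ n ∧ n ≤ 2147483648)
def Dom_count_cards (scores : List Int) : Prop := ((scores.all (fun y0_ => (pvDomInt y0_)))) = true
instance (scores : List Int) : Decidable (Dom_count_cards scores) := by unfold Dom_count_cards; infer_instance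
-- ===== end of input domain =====

-- B replaces A's card-major in-place range propagation (append at the end) by a
-- position-major single pass computing each position's count from the closed formula;
-- objective: alternative (different traversal order, no mutation/append bookkeeping).

-- ===== PORT A =====
-- literal transliteration of A: fold over enumerate(scores); inner loop over
-- range(1, score+1) sets counts[card_id+idx] += n_cards or appends.
-- card_id ≥ 0 and idx ≥ 1, so count_id ≥ 1: pySetD/pyGetD with this nonneg index are exact.
def count_cards (scores : List Int) : List Int :=
  (PySem.List.enumerate scores 0).foldl
    (fun counts ce =>
      let card_id : Int := ce.1
      let score : Int := ce.2
      let n_cards : Int := PySem.List.pyGetD counts card_id 0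
      (PySem.List.pyRange 1 (score + 1) 1).foldl
        (fun counts idx =>
          let count_id : Int := card_id + idx
          if count_id < (counts.length : Int) then
            PySem.List.pySetD counts count_id (PySem.List.pyGetD counts count_id 0 + n_cards)
          else
            counts ++ [n_cards])
        counts)
    (List.replicate scores.length 1)

-- ===== PORT B =====
-- literal transliteration of Source B: first pass computes the final length `total`,
-- second pass builds each position's count from the closed formula.
def count_cards_alt (scores : List Int) : List Int :=
  let n : Int := scores.length
  let total : Int :=
    (PySem.List.enumerate scores 0).foldl
      (fun t e => if e.1 + e.2 + 1 > t then e.1 + e.2 + 1 else t) n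
  (PySem.List.pyRange 0 total 1).foldl
    (fun counts j =>
      let c0 : Int := if j < n then 1 else 0
      let c : Int :=
        (PySem.List.pyRange 0 (min j n) 1).foldl
          (fun c i =>
            if j - i ≤ PySem.List.pyGetD scores i 0 then
              c + PySem.List.pyGetD counts i 0
            else c)
          c0
      counts ++ [c])
    []

-- ===== PRECONDITION & SPEC =====
def Spec_count_cards (scores : List Int) (out : List Int) : Prop := out = count_cards_alt scores
instance (scores : List Int) (out : List Int) : Decidable (Spec_count_cards scores out) := by unfold Spec_count_cards; infer_instance

-- ===== CLAIM (what is proved, stated in full; the proofs are below) =====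
def Claim_equal_count_cards : Prop := ∀ (scores : List Int), Dom_count_cards scores → Spec_count_cards scores (count_cards scores)

-- ===== LEMMAS AND PROOFS =====
-- Reference objects: `buildC scores L` is the list of final counts for positions
-- 0..L-1 (`cF` its entries), `LkI scores k` the output length after cards 0..k-1,
-- `partialS scores k j` the contributions received by position j from cards 0..k-1,
-- and `midL scores k` the whole intermediate counts list of A after k cards.

def sAt (scores : List Int) (i : Nat) : Int := scores.getD i 0
def baseV (scores : List Int) (j : Nat) : Int := if j < scores.length then 1 else 0

def pendS (scores : List Int) (p : List Int) (j : Nat) : Int :=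
  ((List.range (min j scores.length)).map
    (fun i => if (j : Int) - i ≤ sAt scores i then p.getD i 0 else 0)).sum

def buildC (scores : List Int) : Nat → List Int
  | 0 => []
  | j + 1 => buildC scores j ++ [baseV scores j + pendS scores (buildC scores j) j]

def cF (scores : List Int) (j : Nat) : Int := (buildC scores (j + 1)).getD j 0

def partialS (scores : List Int) (k j : Nat) : Int :=
  ((List.range (min k j)).map
    (fun i => if (j : Int) - i ≤ sAt scores i then cF scores i else 0)).sum

def LkI (scores : List Int) (k : Nat) : Int :=
  (List.range k).foldl
    (fun (t : Int) (i : Nat) =>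
      if (i : Int) + sAt scores i + 1 > t then (i : Int) + sAt scores i + 1 else t)
    (scores.length : Int)

theorem length_buildC (scores : List Int) (j : Nat) : (buildC scores j).length = j := by
  induction j with
  | zero => rfl
  | succ j ih => simp [buildC, ih]

theorem buildC_succ (scores : List Int) (j : Nat) :
    buildC scores (j + 1) = buildC scores j ++ [baseV scores j + pendS scores (buildC scores j) j] := rfl

theorem cF_eq (scores : List Int) (j : Nat) :
    cF scores j = baseV scores j + pendS scores (buildC scores j) j := by
  unfold cF
  rw [buildC_succ]
  rw [List.getD_eq_getElem?_getD]
  rw [List.getElem?_append_right (by simp [length_buildC])]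
  simp [length_buildC]

theorem getD_buildC (scores : List Int) {i j : Nat} (h : i < j) :
    (buildC scores j).getD i 0 = cF scores i := by
  induction j with
  | zero => omega
  | succ j ih =>
    rw [buildC_succ]
    rcases Nat.lt_or_ge i j with hij | hij
    · rw [List.getD_append _ _ _ _ (by simp [length_buildC]; omega)]
      exact ih hij
    · have : i = j := by omega
      subst this
      rw [← buildC_succ]
      rfl

theorem buildC_eq_map (scores : List Int) (j : Nat) :
    buildC scores j = (List.range j).map (cF scores) := by
  induction j with
  | zero => rfl
  | succ j ih =>
    rw [buildC_succ, List.range_succ, List.map_append, List.map_singleton, cF_eq, ih]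

theorem cF_unfold (scores : List Int) (j : Nat) :
    cF scores j = baseV scores j +
      ((List.range (min j scores.length)).map
        (fun i => if (j : Int) - i ≤ sAt scores i then cF scores i else 0)).sum := by
  rw [cF_eq]
  congr 1
  unfold pendS
  congr 1
  apply List.map_congr_left
  intro i hi
  have hij : i < j := lt_of_lt_of_le (List.mem_range.mp hi) (min_le_left _ _)
  rw [getD_buildC scores hij]

theorem LkI_succ (scores : List Int) (k : Nat) :
    LkI scores (k + 1) =
      if (k : Int) + sAt scores k + 1 > LkI scores k then (k : Int) + sAt scores k + 1
      else LkI scores k := by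
  unfold LkI
  rw [List.range_succ, List.foldl_append]
  rfl

theorem n_le_LkI (scores : List Int) (k : Nat) : (scores.length : Int) ≤ LkI scores k := by
  induction k with
  | zero => exact le_refl _
  | succ k ih => rw [LkI_succ]; split <;> omega

theorem bound_le_LkI (scores : List Int) {i k : Nat} (h : i < k) :
    (i : Int) + sAt scores i + 1 ≤ LkI scores k := by
  induction k with
  | zero => omega
  | succ k ih =>
    rw [LkI_succ]
    rcases Nat.lt_or_ge i k with h' | h'
    · have := ih h'
      split <;> omega
    · have : i = k := by omega
      subst this
      split <;> omega

theorem enumerate_eq_map_range (xs : List Int) (s : Int) :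
    PySem.List.enumerate xs s =
      (List.range xs.length).map (fun (k : Nat) => ((s + k : Int), xs.getD k 0)) := by
  induction xs generalizing s with
  | nil => simp [PySem.List.enumerate_nil]
  | cons x xs ih =>
    rw [PySem.List.enumerate_cons, ih]
    simp only [List.length_cons, List.range_succ_eq_map, List.map_cons, List.map_map]
    refine List.cons_eq_cons.mpr ⟨by simp, ?_⟩
    apply List.map_congr_left
    intro k hk
    simp only [Function.comp]
    refine Prod.ext ?_ rfl
    push_cast
    ring

theorem foldl_if_add {β : Type} (l : List β) (P : β → Prop) [DecidablePred P] (f : β → Int) (a : Int) :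
    l.foldl (fun c x => if P x then c + f x else c) a
      = a + (l.map (fun x => if P x then f x else 0)).sum := by
  have h : (fun (c : Int) x => if P x then c + f x else c)
      = fun (c : Int) x => c + (if P x then f x else 0) := by
    funext c x; split <;> simp
  rw [h, PySem.List.foldl_add]

theorem total_eq (scores : List Int) :
    (PySem.List.enumerate scores 0).foldl
        (fun t e => if e.1 + e.2 + 1 > t then e.1 + e.2 + 1 else t) (scores.length : Int)
      = LkI scores scores.length := by
  rw [enumerate_eq_map_range, List.foldl_map]
  unfold LkI
  simp only [zero_add, sAt]

theorem inner_val (scores : List Int) (counts : List Int) (L : Nat) :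
    (PySem.List.pyRange 0 (min (L : Int) (scores.length : Int)) 1).foldl
        (fun c i => if (L : Int) - i ≤ PySem.List.pyGetD scores i 0
          then c + PySem.List.pyGetD counts i 0 else c)
        (if (L : Int) < (scores.length : Int) then 1 else 0)
      = baseV scores L + pendS scores counts L := by
  have hmin : min (L : Int) (scores.length : Int) = ((min L scores.length : Nat) : Int) := by
    push_cast; rfl
  rw [hmin, PySem.List.pyRange_zero_natCast, List.foldl_map]
  have := foldl_if_add (List.range (min L scores.length))
    (fun (i : Nat) => (L : Int) - (i : Int) ≤ PySem.List.pyGetD scores (i : Int) 0)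
    (fun (i : Nat) => PySem.List.pyGetD counts (i : Int) 0)
    (if (L : Int) < (scores.length : Int) then 1 else 0)
  rw [this]
  congr 1
  · simp [baseV]
  · unfold pendS
    simp [sAt, PySem.List.pyGetD_natCast]

theorem B_loop (scores : List Int) (L : Nat) :
    (List.range L).foldl
      (fun counts (k : Nat) =>
        counts ++ [(PySem.List.pyRange 0 (min (k : Int) (scores.length : Int)) 1).foldl
          (fun c i => if (k : Int) - i ≤ PySem.List.pyGetD scores i 0
            then c + PySem.List.pyGetD counts i 0 else c)
          (if (k : Int) < (scores.length : Int) then 1 else 0)])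
      [] = buildC scores L := by
  induction L with
  | zero => rfl
  | succ L ih =>
    rw [List.range_succ, List.foldl_append, List.foldl_cons, List.foldl_nil, ih, buildC_succ,
      inner_val]

theorem alt_eq_buildC (scores : List Int) :
    count_cards_alt scores = buildC scores ((LkI scores scores.length).toNat) := by
  unfold count_cards_alt
  dsimp only
  rw [total_eq, PySem.List.pyRange_zero, List.foldl_map]
  exact B_loop scores ((LkI scores scores.length).toNat)

theorem mapRange_set (N p : Nat) (f : Nat → Int) (w : Int) :
    ((List.range N).map f).set p w = (List.range N).map (fun j => if j = p then w else f j) := by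
  apply List.ext_getElem
  · simp
  · intro i h1 h2
    simp only [List.getElem_set, List.getElem_map, List.getElem_range]
    by_cases hpi : p = i
    · subst hpi; simp
    · simp only [if_neg hpi, if_neg (fun h : i = p => hpi h.symm)]

theorem map_getD_range (xs : List Int) :
    (List.range xs.length).map (fun j => xs.getD j 0) = xs := by
  apply List.ext_getElem
  · simp
  · intro i h1 h2
    simp [List.getD_eq_getElem?_getD, List.getElem?_eq_getElem h2]

theorem inner_loop (cs0 : List Int) (k : Nat) (v : Int)
    (hk : k < cs0.length) (m : Nat) :
    (List.range m).foldl
      (fun cs (q : Nat) =>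
        if (k : Int) + (1 + (q : Int)) < (cs.length : Int) then
          PySem.List.pySetD cs ((k : Int) + (1 + (q : Int)))
            (PySem.List.pyGetD cs ((k : Int) + (1 + (q : Int))) 0 + v)
        else cs ++ [v]) cs0
    = (List.range (max cs0.length (k + 1 + m))).map
        (fun j => cs0.getD j 0 + if k + 1 ≤ j ∧ j ≤ k + m then v else 0) := by
  induction m with
  | zero =>
    rw [List.range_zero, List.foldl_nil, Nat.max_eq_left (by omega)]
    conv_rhs =>
      rw [List.map_congr_left (fun j hj => by
        rw [if_neg (by omega), add_zero] : ∀ j ∈ List.range cs0.length,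
          (cs0.getD j 0 + if k + 1 ≤ j ∧ j ≤ k + 0 then v else 0) = cs0.getD j 0)]
    rw [map_getD_range]
  | succ m ih =>
    rw [List.range_succ, List.foldl_append, List.foldl_cons, List.foldl_nil, ih]
    have hcast : (k : Int) + (1 + (m : Int)) = ((k + m + 1 : Nat) : Int) := by push_cast; ring
    have hlen : ((List.range (max cs0.length (k + 1 + m))).map
        (fun j => cs0.getD j 0 + if k + 1 ≤ j ∧ j ≤ k + m then v else 0)).length
        = max cs0.length (k + 1 + m) := by simp
    by_cases hc : k + m + 1 < max cs0.length (k + 1 + m)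
    · rw [if_pos (by rw [hlen, hcast]; exact_mod_cast hc), hcast,
        PySem.List.pySetD_natCast, PySem.List.pyGetD_natCast,
        PySem.List.getD_map_range _ _ _ _ hc, mapRange_set]
      have hN : max cs0.length (k + 1 + (m + 1)) = max cs0.length (k + 1 + m) := by omega
      rw [hN]
      apply List.map_congr_left
      intro j hj
      rw [List.mem_range] at hj
      by_cases hje : j = k + m + 1
      · subst hje
        rw [if_pos rfl, if_neg (by omega), add_zero, if_pos (by omega)]
      · rw [if_neg hje]
        by_cases h1 : k + 1 ≤ j ∧ j ≤ k + m
        · rw [if_pos h1, if_pos (by omega)]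
        · rw [if_neg h1, if_neg (by omega)]
    · have hN : max cs0.length (k + 1 + m) = k + m + 1 := by omega
      rw [if_neg (by rw [hlen, hcast]; exact_mod_cast hc)]
      have hN2 : max cs0.length (k + 1 + (m + 1)) = (k + m + 1) + 1 := by omega
      rw [hN2, List.range_succ, List.map_append, List.map_singleton, hN]
      congr 1
      · apply List.map_congr_left
        intro j hj
        rw [List.mem_range] at hj
        by_cases h1 : k + 1 ≤ j ∧ j ≤ k + m
        · rw [if_pos h1, if_pos (by omega)]
        · rw [if_neg h1, if_neg (by omega)]
      · rw [List.getD_eq_default _ _ (by omega), if_pos (by omega), zero_add]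

def midL (scores : List Int) (k : Nat) : List Int :=
  (List.range ((LkI scores k).toNat)).map (fun j => baseV scores j + partialS scores k j)

theorem midL_getD (scores : List Int) (k j : Nat) :
    (midL scores k).getD j 0 = baseV scores j + partialS scores k j := by
  by_cases hj : j < (LkI scores k).toNat
  · exact PySem.List.getD_map_range _ _ _ _ hj
  · rw [List.getD_eq_default _ _ (by simp [midL]; omega)]
    have hn := n_le_LkI scores k
    have hb : baseV scores j = 0 := by
      unfold baseV
      rw [if_neg (by omega)]
    have hp : partialS scores k j = 0 := by
      unfold partialS
      apply List.sum_eq_zero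
      intro x hx
      rw [List.mem_map] at hx
      obtain ⟨i, hi, hix⟩ := hx
      rw [List.mem_range] at hi
      have hik : i < k := lt_of_lt_of_le hi (min_le_left _ _)
      have hbd := bound_le_LkI scores hik
      rw [← hix, if_neg (by omega)]
    rw [hb, hp]; simp

theorem key_at (scores : List Int) {j k : Nat} (hjk : j ≤ k) (hkn : k ≤ scores.length) :
    baseV scores j + partialS scores k j = cF scores j := by
  rw [cF_unfold]
  congr 1
  unfold partialS
  rw [min_eq_right hjk, min_eq_left (le_trans hjk hkn)]

theorem key_final (scores : List Int) (j : Nat) :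
    baseV scores j + partialS scores scores.length j = cF scores j := by
  rw [cF_unfold]
  congr 1
  unfold partialS
  rw [min_comm]

theorem partialS_succ (scores : List Int) (k j : Nat) :
    partialS scores (k + 1) j
      = partialS scores k j
        + (if k + 1 ≤ j ∧ (j : Int) - k ≤ sAt scores k then cF scores k else 0) := by
  unfold partialS
  rcases Nat.lt_or_ge j (k + 1) with hj | hj
  · rw [min_eq_right (by omega), min_eq_right (by omega), if_neg (by omega), add_zero]
  · rw [min_eq_left (by omega), min_eq_left (by omega), List.range_succ, List.map_append,
      List.sum_append, List.map_singleton, List.sum_singleton]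
    congr 1
    by_cases hc : (j : Int) - k ≤ sAt scores k
    · rw [if_pos hc, if_pos ⟨by omega, hc⟩]
    · rw [if_neg hc, if_neg (by tauto)]

theorem midL_zero (scores : List Int) : midL scores 0 = List.replicate scores.length 1 := by
  unfold midL
  have h : (LkI scores 0).toNat = scores.length := by unfold LkI; simp
  rw [h]
  apply List.ext_getElem
  · simp
  · intro i h1 h2
    have hi : i < scores.length := by simpa using h1
    simp [baseV, partialS, hi]

theorem length_midL (scores : List Int) (k : Nat) :
    (midL scores k).length = (LkI scores k).toNat := by simp [midL]

theorem A_loop (scores : List Int) : ∀ k, k ≤ scores.length →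
    (List.range k).foldl
      (fun counts (i : Nat) =>
        (PySem.List.pyRange 1 (scores.getD i 0 + 1) 1).foldl
          (fun cs idx =>
            if (i : Int) + idx < (cs.length : Int) then
              PySem.List.pySetD cs ((i : Int) + idx)
                (PySem.List.pyGetD cs ((i : Int) + idx) 0 + PySem.List.pyGetD counts (i : Int) 0)
            else cs ++ [PySem.List.pyGetD counts (i : Int) 0])
          counts)
      (List.replicate scores.length 1)
    = midL scores k := by
  intro k
  induction k with
  | zero => intro _; rw [List.range_zero, List.foldl_nil, midL_zero]
  | succ k ih =>
    intro hk1
    have hkn : k < scores.length := by omega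
    rw [List.range_succ, List.foldl_append, List.foldl_cons, List.foldl_nil, ih (by omega)]
    have hnk := n_le_LkI scores k
    have hklen : k < (midL scores k).length := by rw [length_midL]; omega
    have hv : PySem.List.pyGetD (midL scores k) (k : Int) 0 = cF scores k := by
      rw [PySem.List.pyGetD_natCast, midL_getD, key_at scores (le_refl k) (by omega)]
    rw [hv]
    have hrange : PySem.List.pyRange 1 (scores.getD k 0 + 1) 1
        = (List.range (scores.getD k 0).toNat).map (fun (q : Nat) => (1 + q : Int)) := by
      rw [PySem.List.pyRange_one, add_sub_cancel_right]
    rw [hrange, List.foldl_map]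
    rw [inner_loop (midL scores k) k (cF scores k) hklen ((scores.getD k 0).toNat)]
    have hsk : sAt scores k = scores.getD k 0 := rfl
    have hlen2 : max (midL scores k).length (k + 1 + (scores.getD k 0).toNat)
        = (LkI scores (k + 1)).toNat := by
      rw [length_midL, LkI_succ, ← hsk]
      split <;> omega
    rw [hlen2]
    show _ = (List.range ((LkI scores (k + 1)).toNat)).map
      (fun j => baseV scores j + partialS scores (k + 1) j)
    apply List.map_congr_left
    intro j hj
    rw [midL_getD, partialS_succ, hsk]
    have hind : (if k + 1 ≤ j ∧ j ≤ k + (scores.getD k 0).toNat then cF scores k else 0)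
        = (if k + 1 ≤ j ∧ (j : Int) - k ≤ scores.getD k 0 then cF scores k else 0) := by
      refine if_congr ?_ rfl rfl
      omega
    rw [hind]
    ring

theorem A_eq_midL (scores : List Int) : count_cards scores = midL scores scores.length := by
  unfold count_cards
  dsimp only
  rw [enumerate_eq_map_range, List.foldl_map]
  simp only [zero_add]
  exact A_loop scores scores.length le_rfl

theorem count_cards_eq_alt (scores : List Int) : count_cards scores = count_cards_alt scores := by
  rw [alt_eq_buildC, A_eq_midL]
  unfold midL
  rw [buildC_eq_map]
  apply List.map_congr_left
  intro j _
  exact key_final scores j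

-- ===== VERDICT (by name: the statement is the Claim_ definition above) =====
theorem count_cards_spec : Claim_equal_count_cards := by
  intro scores _
  unfold Spec_count_cards
  exact count_cards_eq_alt scores
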